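-- pv_equiv track=rewrite | github.com/mosecund/zeros_consecutifs | INFOF103 Algorithmique Exercice 1.py | zeros_consecutifs
-- ===== SOURCE A (Python) =====
-- def zeros_consecutifs(n, binaire_n=""):
--     """
--     Fonction récursive qui retourne le plus grand nombre de 0 consécutifs
--     dans la représentation binaire de n
--
--     Arguments :
--
--     - n : un nombre entier positif
--     - vous pouvez ajouter autant d’arguments optionnels que vous le souhaitez
--     """
--
--     assert (isinstance(n, int))
--
--     if binaire_n == "":                                                         # verifie si binaire_n est vide et
--                                                                                 # n est en binaire ou pas
--         binaire_n = f'{n:b}'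
--
--     if binaire_n != "":                                                         # n a deja ete convertie
--         compteur = 0
--         compteur_zero = 0
--
--         while len(binaire_n[compteur:]) != 0 and binaire_n[compteur] != "1":    # on verifie binaire_n à partir de
--             compteur_zero += 1
--             compteur += 1
--
--         binaire_n = binaire_n[compteur + 1:]
--
--         if binaire_n != "":                                                     # verifie la condition de fin pour
--                                                                                 # arreter la récursion
--             compteur_zero = max(compteur_zero, zeros_consecutifs(n, binaire_n))
--
--     return compteur_zero
-- ===== SOURCE B (Python) =====
-- def zeros_consecutifs(n, binaire_n=""):
--     """Single linear scan tracking current and best run of non-'1' characters."""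
--     assert (isinstance(n, int))
--     if binaire_n == "":
--         binaire_n = f'{n:b}'
--     cur = 0
--     best = 0
--     for c in binaire_n:
--         if c == "1":
--             cur = 0
--         else:
--             cur += 1
--             if cur > best:
--                 best = cur
--     return best
-- ===== Notes on version B (the rewrite author's own statement) =====
-- stated objective: faster
-- what changed: Replaced A's recursion that re-counts a leading non-'1' run and recurses on the remaining suffix with a single left-to-right scan keeping the current and best run lengths.
import Mathlib
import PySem

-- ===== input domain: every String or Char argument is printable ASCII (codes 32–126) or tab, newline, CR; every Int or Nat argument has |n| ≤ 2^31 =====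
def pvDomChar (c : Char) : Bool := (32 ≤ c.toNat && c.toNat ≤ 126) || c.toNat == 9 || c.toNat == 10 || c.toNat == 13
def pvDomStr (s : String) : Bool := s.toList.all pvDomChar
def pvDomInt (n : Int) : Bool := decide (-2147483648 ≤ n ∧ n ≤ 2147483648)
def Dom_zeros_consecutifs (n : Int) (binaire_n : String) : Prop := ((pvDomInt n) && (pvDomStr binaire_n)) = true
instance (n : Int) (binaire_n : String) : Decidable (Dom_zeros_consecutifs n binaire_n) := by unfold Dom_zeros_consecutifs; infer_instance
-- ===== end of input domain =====

-- B replaces A's O(L^2) recursion (re-scanning the suffix after every '1') by one linear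
-- scan tracking the current and best run of non-'1' characters; objective: faster.

-- ===== PORT A =====
-- A's use of Python's built-in f'{n:b}' (binary formatting, '-' sign for n < 0)
def pvNatBitsA : Nat → List Char
  | 0 => []
  | m + 1 => pvNatBitsA ((m + 1) / 2) ++ [if (m + 1) % 2 = 1 then '1' else '0']
decreasing_by exact Nat.div_lt_self (Nat.succ_pos m) (by norm_num)

def pvToBinA (n : Int) : String :=
  if n < 0 then String.ofList ('-' :: pvNatBitsA (-n).toNat)
  else if n = 0 then "0"
  else String.ofList (pvNatBitsA n.toNat)

-- A's while loop: count of leading characters ≠ '1'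
def pvCnt : List Char → Nat
  | [] => 0
  | c :: t => if c = '1' then 0 else pvCnt t + 1

-- A's body on a non-empty string: count leading non-'1' run, drop it plus one char, recurse.
def pvAuxA (l : List Char) : Nat :=
  let k := pvCnt l
  let rest := l.drop (k + 1)
  if h : rest = [] then k else max k (pvAuxA rest)
termination_by l.length
decreasing_by
  have : rest.length ≠ 0 := fun hz => h (List.eq_nil_of_length_eq_zero hz)
  simp only [rest, List.length_drop] at this ⊢
  omega

-- (the guard `if binaire_n != ""` is always true: f'{n:b}' is never empty, and on an
--  initially non-empty binaire_n it is unchanged; pvAuxA is exactly that guarded body)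
def zeros_consecutifs (n : Int) (binaire_n : String) : Int :=
  let b := if binaire_n = "" then pvToBinA n else binaire_n
  (pvAuxA b.toList : Int)

-- ===== PORT B =====
-- B's use of the same built-in f'{n:b}'
def pvNatBitsB : Nat → List Char
  | 0 => []
  | m + 1 => pvNatBitsB ((m + 1) / 2) ++ [if (m + 1) % 2 = 1 then '1' else '0']
decreasing_by exact Nat.div_lt_self (Nat.succ_pos m) (by norm_num)

def pvToBinB (n : Int) : String :=
  if n < 0 then String.ofList ('-' :: pvNatBitsB (-n).toNat)
  else if n = 0 then "0"
  else String.ofList (pvNatBitsB n.toNat)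

-- one step of B's for loop: reset on '1', else extend current run and update best
def pvStep (st : Nat × Nat) (c : Char) : Nat × Nat :=
  if c = '1' then (0, st.2)
  else (st.1 + 1, if st.1 + 1 > st.2 then st.1 + 1 else st.2)

def zeros_consecutifs_alt (n : Int) (binaire_n : String) : Int :=
  let b := if binaire_n = "" then pvToBinB n else binaire_n
  ((b.toList.foldl pvStep (0, 0)).2 : Int)

-- ===== PRECONDITION & SPEC =====
def Spec_zeros_consecutifs (n : Int) (binaire_n : String) (out : Int) : Prop := out = zeros_consecutifs_alt n binaire_n
instance (n : Int) (binaire_n : String) (out : Int) : Decidable (Spec_zeros_consecutifs n binaire_n out) := by unfold Spec_zeros_consecutifs; infer_instance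

-- ===== CLAIM (what is proved, stated in full; the proofs are below) =====
def Claim_equal_zeros_consecutifs : Prop := ∀ (n : Int) (binaire_n : String), Dom_zeros_consecutifs n binaire_n → Spec_zeros_consecutifs n binaire_n (zeros_consecutifs n binaire_n)

-- ===== LEMMAS AND PROOFS =====

-- the two copies of the built-in f'{n:b}' agree
theorem pvNatBits_eq (m : Nat) : pvNatBitsB m = pvNatBitsA m := by
  induction m using Nat.strong_induction_on with
  | _ m ih =>
    match m with
    | 0 => rw [pvNatBitsB, pvNatBitsA]
    | m + 1 =>
      rw [pvNatBitsB, pvNatBitsA, ih ((m + 1) / 2) (Nat.div_lt_self (Nat.succ_pos m) (by norm_num))]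

theorem pvToBin_eq (n : Int) : pvToBinB n = pvToBinA n := by
  unfold pvToBinA pvToBinB
  simp [pvNatBits_eq]

-- proof-only functional model: pvF cur l = best run seen, starting with a current run of cur
def pvF (cur : Nat) : List Char → Nat
  | [] => cur
  | c :: t => if c = '1' then max cur (pvF 0 t) else pvF (cur + 1) t

theorem le_pvF (l : List Char) : ∀ cur, cur ≤ pvF cur l := by
  induction l with
  | nil => intro cur; simp [pvF]
  | cons c t ih =>
    intro cur
    simp only [pvF]
    split_ifs
    · exact le_max_left _ _
    · exact le_trans (Nat.le_succ cur) (ih (cur + 1))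

theorem fold_eq_pvF (l : List Char) : ∀ cur best, cur ≤ best →
    (l.foldl pvStep (cur, best)).2 = max best (pvF cur l) := by
  induction l with
  | nil => intro cur best h; simp [pvF, Nat.max_eq_left h]
  | cons c t ih =>
    intro cur best h
    by_cases h1 : c = '1'
    · simp only [List.foldl, pvStep, pvF, if_pos h1]
      rw [ih 0 best (Nat.zero_le _)]
      omega
    · simp only [List.foldl, pvStep, pvF, if_neg h1]
      have hc : cur + 1 ≤ if cur + 1 > best then cur + 1 else best := by split_ifs <;> omega
      rw [ih (cur + 1) _ hc]
      have := le_pvF t (cur + 1)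
      split_ifs <;> omega

theorem pvF_split (l : List Char) : ∀ cur,
    pvF cur l = max (cur + pvCnt l) (pvF 0 (l.drop (pvCnt l + 1))) := by
  induction l with
  | nil => intro cur; simp [pvF, pvCnt]
  | cons c t ih =>
    intro cur
    by_cases h1 : c = '1'
    · simp [pvF, pvCnt, h1]
    · simp only [pvF, pvCnt, if_neg h1]
      rw [ih (cur + 1)]
      have : pvCnt t + 1 + 1 = pvCnt t + 2 := rfl
      simp only [this, List.drop_succ_cons]
      omega

theorem auxA_eq_pvF (l : List Char) : pvAuxA l = pvF 0 l := by
  rw [pvAuxA, pvF_split l 0]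
  simp only [Nat.zero_add]
  split_ifs with h
  · rw [h]; simp [pvF]
  · rw [auxA_eq_pvF (l.drop (pvCnt l + 1))]
termination_by l.length
decreasing_by
  have : (l.drop (pvCnt l + 1)).length ≠ 0 := fun hz => h (List.eq_nil_of_length_eq_zero hz)
  simp only [List.length_drop] at this ⊢
  omega

-- ===== VERDICT (by name: the statement is the Claim_ definition above) =====
theorem zeros_consecutifs_spec : Claim_equal_zeros_consecutifs := by
  intro n s _
  have h := fold_eq_pvF (if s = "" then pvToBinA n else s).toList 0 0 le_rfl
  simp only [Nat.zero_max] at h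
  show (pvAuxA (if s = "" then pvToBinA n else s).toList : Int)
      = (((if s = "" then pvToBinB n else s).toList.foldl pvStep (0, 0)).2 : Int)
  rw [pvToBin_eq, auxA_eq_pvF, ← h]
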